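-- pv_equiv track=rewrite | github.com/PiJoules/pythonic-c | cparse.py | iter_tracking
-- ===== SOURCE A (Python) =====
-- def iter_tracking(iterable):
--     """
--     Yields:
--         Any: The item returned by the iterable
--         bool: If the item is the first item in the iterable
--         bool: If the item is the last item in the iterable
--     """
--     iter_ = iter(iterable)
--     item = next(iter_)  # Raises Stopiteration if empty
--
--     try:
--         next_item = next(iter_)
--     except StopIteration:
--         # Iterable has only 1 item
--         yield item, True, True
--         return
--     else:
--         # Iterable has more than 1 item
--         yield item, True, False
--
--     while True:
--         item = next_item
--         try:
--             next_item = next(iter_)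
--         except StopIteration:
--             # Reached end
--             yield item, False, True
--             return
--         else:
--             # Has more
--             yield item, False, False
-- ===== SOURCE B (Python) =====
-- def iter_tracking(iterable):
--     """Yield (item, is_first, is_last) for each item, by materializing the
--     iterable and indexing, instead of one-step lookahead with StopIteration
--     handling. On an empty iterable this yields nothing (A raises RuntimeError)."""
--     items = list(iterable)
--     last = len(items) - 1
--     for i, item in enumerate(items):
--         yield item, i == 0, i == last
-- ===== Notes on version B (the rewrite author's own statement) =====
-- stated objective: idiomatic
-- what changed: Replaces the while/try/except one-step-lookahead generator with a materialize-then-enumerate pass computing the flags by index comparison (i==0, i==last).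
import Mathlib
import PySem

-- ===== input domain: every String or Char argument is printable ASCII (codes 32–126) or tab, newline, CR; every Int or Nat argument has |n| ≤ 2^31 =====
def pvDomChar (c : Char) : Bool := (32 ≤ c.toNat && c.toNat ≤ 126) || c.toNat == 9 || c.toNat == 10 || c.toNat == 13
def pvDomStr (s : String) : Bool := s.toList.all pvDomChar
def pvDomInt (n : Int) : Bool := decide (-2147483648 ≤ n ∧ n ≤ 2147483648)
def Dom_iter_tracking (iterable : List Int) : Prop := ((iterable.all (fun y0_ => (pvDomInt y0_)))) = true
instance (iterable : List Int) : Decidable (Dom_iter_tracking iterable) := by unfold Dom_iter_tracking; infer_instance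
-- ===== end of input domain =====

-- B replaces A's while/try/except one-step lookahead by enumerate with index flags (i==0, i==last).
-- Equivalence is about the yielded sequence; on the empty input A raises (excluded by Pre_).

-- ===== PORT A =====
-- the 'while True' lookahead loop: item = head, next_item from rest
def iterLoopA (item : Int) (rest : List Int) : List (Int × Bool × Bool) :=
  match rest with
  | [] => [(item, false, true)]          -- StopIteration: reached end
  | n :: r => (item, false, false) :: iterLoopA n r

def iter_tracking (iterable : List Int) : List (Int × Bool × Bool) :=
  match iterable with
  | [] => []                             -- Python raises here; excluded by Pre_
  | [x] => [(x, true, true)]             -- only 1 item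
  | x :: y :: rest => (x, true, false) :: iterLoopA y rest

-- ===== PORT B =====
def iter_tracking_alt (iterable : List Int) : List (Int × Bool × Bool) :=
  let last : Int := (iterable.length : Int) - 1
  (PySem.List.enumerate iterable).map (fun p => (p.2, p.1 == 0, p.1 == last))

-- ===== PRECONDITION & SPEC =====
-- Pre_ excludes the empty list, on which A's generator raises RuntimeError (PEP 479).
def Pre_iter_tracking (iterable : List Int) : Prop := iterable ≠ []
instance (iterable : List Int) : Decidable (Pre_iter_tracking iterable) := by unfold Pre_iter_tracking; infer_instance
def pvWitness_iter_tracking : List Int := [1, 2, 3]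

def Spec_iter_tracking (iterable : List Int) (out : List (Int × Bool × Bool)) : Prop := out = iter_tracking_alt iterable
instance (iterable : List Int) (out : List (Int × Bool × Bool)) : Decidable (Spec_iter_tracking iterable out) := by unfold Spec_iter_tracking; infer_instance

-- ===== CLAIM =====
def Claim_equal_iter_tracking : Prop := ∀ (iterable : List Int), Dom_iter_tracking iterable → Pre_iter_tracking iterable → Spec_iter_tracking iterable (iter_tracking iterable)

-- ===== LEMMAS AND PROOFS =====
-- the lookahead loop agrees with the enumerate pass started at index s
lemma iterLoopA_eq (item : Int) (rest : List Int) (s : Int) :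
    iterLoopA item rest =
      (PySem.List.enumerate (item :: rest) s).map
        (fun p => (p.2, false, p.1 == s + rest.length)) := by
  induction rest generalizing item s with
  | nil => simp [iterLoopA, PySem.List.enumerate_cons, PySem.List.enumerate_nil]
  | cons n r ih =>
      have hlen : s + (((n :: r).length : Nat) : Int) = (s + 1) + (r.length : Int) := by
        simp [List.length_cons]; ring
      simp only [iterLoopA, PySem.List.enumerate_cons, List.map_cons, ih n (s + 1), hlen]
      have hne : (s == s + 1 + (r.length : Int)) = false := by
        rw [beq_eq_false_iff_ne]; omega
      simp [hne]

-- ===== VERDICT =====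
theorem iter_tracking_spec : Claim_equal_iter_tracking := by
  intro iterable _ hpre
  unfold Spec_iter_tracking
  match iterable with
  | [] => exact absurd rfl hpre
  | [x] =>
      simp [iter_tracking, iter_tracking_alt, PySem.List.enumerate_cons, PySem.List.enumerate_nil]
  | x :: y :: rest =>
      simp only [iter_tracking, iter_tracking_alt, PySem.List.enumerate_cons, List.map_cons]
      rw [iterLoopA_eq y rest 1]
      have hlen : (((x :: y :: rest).length : Nat) : Int) - 1 = 1 + (rest.length : Int) := by
        simp [List.length_cons]; ring
      simp only [hlen, PySem.List.enumerate_cons, List.map_cons, List.cons.injEq]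
      have h0 : ((0 : Int) == 1 + (rest.length : Int)) = false := by
        rw [beq_eq_false_iff_ne]; omega
      refine ⟨by simp [h0], by simp, ?_⟩
      apply List.map_congr_left
      intro p hp
      have hfst : (p.1 == (0 : Int)) = false := by
        rcases (PySem.List.mem_enumerate_iff _ _ _).mp hp with ⟨k, hk, hpk⟩
        subst hpk; rw [beq_eq_false_iff_ne]; omega
      simp [hfst]
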